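-- pv_equiv track=rewrite | github.com/VKK-00/bugrov_leaks | build.py | classify_href
-- ===== SOURCE A (Python) =====
-- def classify_href(href: str) -> str:
--     """Determine attachment type from href."""
--     h = href.lower()
--     if "/photos/" in h or h.startswith("photos/") or any(h.endswith(ext) for ext in (".jpg", ".jpeg", ".png", ".webp", ".gif")):
--         return "photo"
--     if "/video_files/" in h or h.startswith("video_files/") or any(h.endswith(ext) for ext in (".mp4", ".mov", ".webm", ".mkv")):
--         return "video"
--     if "/stickers/" in h or h.startswith("stickers/"):
--         return "sticker"
--     if "/voice_messages/" in h or h.startswith("voice_messages/") or h.endswith(".ogg"):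
--         return "voice"
--     if "/round_video_messages/" in h or h.startswith("round_video_messages/"):
--         return "round_video"
--     if "/files/" in h or h.startswith("files/"):
--         return "file"
--     return "file"
-- ===== SOURCE B (Python) =====
-- _DIR_PRIO = {
--     "photos": 0,
--     "video_files": 1,
--     "stickers": 2,
--     "voice_messages": 3,
--     "round_video_messages": 4,
--     "files": 5,
-- }
--
-- _EXT_PRIO = {
--     ".jpg": 0, ".jpeg": 0, ".png": 0, ".webp": 0, ".gif": 0,
--     ".mp4": 1, ".mov": 1, ".webm": 1, ".mkv": 1,
--     ".ogg": 3,
-- }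
--
-- _LABELS = ("photo", "video", "sticker", "voice", "round_video", "file")
--
--
-- def classify_href(href: str) -> str:
--     """Determine attachment type from href."""
--     best = 5
--     seg = ""
--     ext = None
--     for c in href.lower():
--         if c == "/":
--             best = min(best, _DIR_PRIO.get(seg, 5))
--             seg = ""
--             ext = None
--         else:
--             seg += c
--             if c == ".":
--                 ext = "."
--             elif ext is not None:
--                 ext += c
--     if ext is not None:
--         best = min(best, _EXT_PRIO.get(ext, 5))
--     return _LABELS[best]
-- ===== Notes on version B (the rewrite author's own statement) =====
-- stated objective: alternative
-- what changed: Instead of A's six independent substring/prefix/suffix scans over the href with an if-ladder, B makes one character-level pass that tokenizes the lower-cased path (completing a directory segment at each '/', tracking the last segment's extension after its last '.'), looks each token up in priority dictionaries and keeps the running minimum rule priority, indexing a label table at the end.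
import Mathlib
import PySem

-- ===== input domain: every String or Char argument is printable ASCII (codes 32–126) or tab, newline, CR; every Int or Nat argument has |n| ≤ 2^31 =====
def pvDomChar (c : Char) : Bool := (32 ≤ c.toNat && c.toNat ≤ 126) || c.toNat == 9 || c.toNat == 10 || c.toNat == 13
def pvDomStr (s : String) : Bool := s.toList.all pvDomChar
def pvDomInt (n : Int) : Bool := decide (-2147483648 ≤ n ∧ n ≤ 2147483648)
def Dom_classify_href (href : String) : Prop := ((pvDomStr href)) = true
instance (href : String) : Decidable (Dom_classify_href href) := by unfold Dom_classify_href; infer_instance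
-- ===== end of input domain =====

-- B replaces A's six repeated substring/prefix/suffix scans and branch ladder by a single
-- character-level pass that tokenizes the path (directory segments, extension of the last
-- segment) and keeps the minimum rule priority seen (alternative algorithm).

-- ===== PORT A =====
def classify_href (href : String) : String :=
  let h := PySem.Str.lower href
  if PySem.Str.isIn "/photos/" h || PySem.Str.startswith h "photos/" ||
      ([".jpg", ".jpeg", ".png", ".webp", ".gif"].any (fun ext => PySem.Str.endswith h ext)) then
    "photo"
  else if PySem.Str.isIn "/video_files/" h || PySem.Str.startswith h "video_files/" ||
      ([".mp4", ".mov", ".webm", ".mkv"].any (fun ext => PySem.Str.endswith h ext)) then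
    "video"
  else if PySem.Str.isIn "/stickers/" h || PySem.Str.startswith h "stickers/" then
    "sticker"
  else if PySem.Str.isIn "/voice_messages/" h || PySem.Str.startswith h "voice_messages/" ||
      PySem.Str.endswith h ".ogg" then
    "voice"
  else if PySem.Str.isIn "/round_video_messages/" h || PySem.Str.startswith h "round_video_messages/" then
    "round_video"
  else if PySem.Str.isIn "/files/" h || PySem.Str.startswith h "files/" then
    "file"
  else
    "file"

-- ===== PORT B =====
-- _DIR_PRIO / _EXT_PRIO / _LABELS of Source B (its string keys live in the Chars world: List Char)
def pvDirPrio : PySem.Dict (List Char) Int :=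
  PySem.Dict.ofList [("photos".toList, 0), ("video_files".toList, 1), ("stickers".toList, 2),
    ("voice_messages".toList, 3), ("round_video_messages".toList, 4), ("files".toList, 5)]

def pvExtPrio : PySem.Dict (List Char) Int :=
  PySem.Dict.ofList [(".jpg".toList, 0), (".jpeg".toList, 0), (".png".toList, 0),
    (".webp".toList, 0), (".gif".toList, 0), (".mp4".toList, 1), (".mov".toList, 1),
    (".webm".toList, 1), (".mkv".toList, 1), (".ogg".toList, 3)]

def pvLabels : List String := ["photo", "video", "sticker", "voice", "round_video", "file"]

-- one iteration of Source B's for-loop; state = (best, seg, ext)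
def pvStep (st : Int × List Char × Option (List Char)) (c : Char) :
    Int × List Char × Option (List Char) :=
  if c = '/' then (min st.1 (pvDirPrio.getD st.2.1 5), [], none)
  else
    let seg' := st.2.1 ++ [c]
    if c = '.' then (st.1, seg', some ['.'])
    else
      match st.2.2 with
      | some e => (st.1, seg', some (e ++ [c]))
      | none => (st.1, seg', none)

def classify_href_alt (href : String) : String :=
  let st := (PySem.Str.lower href).toList.foldl pvStep (5, [], none)
  let best : Int :=
    match st.2.2 with
    | some e => min st.1 (pvExtPrio.getD e 5)
    | none => st.1
  -- _LABELS[best]: best always lies in [0, 5], so the total indexing form is exact here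
  PySem.List.pyGetD pvLabels best "file"

-- ===== PRECONDITION & SPEC =====
def Spec_classify_href (href : String) (out : String) : Prop := out = classify_href_alt href
instance (href : String) (out : String) : Decidable (Spec_classify_href href out) := by unfold Spec_classify_href; infer_instance

-- ===== CLAIM (what is proved, stated in full; the proofs are below) =====
def Claim_equal_classify_href : Prop := ∀ (href : String), Dom_classify_href href → Spec_classify_href href (classify_href href)

-- ===== LEMMAS AND PROOFS =====

-- spec-side tokenizer: completed ('/'-terminated) segments and the trailing segment
def pvSegs : List Char → List Char → List (List Char) × List Char
  | seg, [] => ([], seg)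
  | seg, c :: r =>
    if c = '/' then (seg :: (pvSegs [] r).1, (pvSegs [] r).2)
    else pvSegs (seg ++ [c]) r

theorem pvSegs_nil (seg : List Char) : pvSegs seg [] = ([], seg) := rfl
theorem pvSegs_slash (seg r : List Char) :
    pvSegs seg ('/' :: r) = (seg :: (pvSegs [] r).1, (pvSegs [] r).2) := by simp [pvSegs]
theorem pvSegs_cons (seg : List Char) (c : Char) (r : List Char) (hc : c ≠ '/') :
    pvSegs seg (c :: r) = pvSegs (seg ++ [c]) r := by simp [pvSegs, hc]

-- spec-side extension of a segment: from its last '.' on, if any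
def pvExtOf (seg : List Char) : Option (List Char) :=
  if '.' ∈ seg then some ('.' :: (seg.reverse.takeWhile (· ≠ '.')).reverse) else none

theorem pvExtOf_nil : pvExtOf [] = none := by simp [pvExtOf]

theorem pvExtOf_snoc_dot (seg : List Char) : pvExtOf (seg ++ ['.']) = some ['.'] := by
  simp [pvExtOf]

theorem pvExtOf_snoc (seg : List Char) (c : Char) (hc : c ≠ '.') :
    pvExtOf (seg ++ [c]) = (pvExtOf seg).map (· ++ [c]) := by
  by_cases h : '.' ∈ seg
  · simp [pvExtOf, h, hc]
  · simp [pvExtOf, h, Ne.symm hc]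

-- the fold of pvStep computes: min priority over completed segments, trailing segment, its ext
theorem pvFold_char (l : List Char) : ∀ (b : Int) (seg : List Char),
    l.foldl pvStep (b, seg, pvExtOf seg) =
      (((pvSegs seg l).1).foldl (fun acc s => min acc (pvDirPrio.getD s 5)) b,
        (pvSegs seg l).2, pvExtOf (pvSegs seg l).2) := by
  induction l with
  | nil => intro b seg; simp [pvSegs]
  | cons c r ih =>
    intro b seg
    by_cases hc : c = '/'
    · subst hc
      have h1 : pvStep (b, seg, pvExtOf seg) '/' = (min b (pvDirPrio.getD seg 5), [], pvExtOf []) := by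
        simp [pvStep, pvExtOf_nil]
      simp only [List.foldl_cons, h1, ih, pvSegs]
      simp
    · by_cases hd : c = '.'
      · subst hd
        have h1 : pvStep (b, seg, pvExtOf seg) '.' = (b, seg ++ ['.'], pvExtOf (seg ++ ['.'])) := by
          simp [pvStep, pvExtOf_snoc_dot]
        simp only [List.foldl_cons, h1, ih, pvSegs, if_neg hc]
      · have h1 : pvStep (b, seg, pvExtOf seg) c = (b, seg ++ [c], pvExtOf (seg ++ [c])) := by
          rw [pvExtOf_snoc seg c hd]
          cases pvExtOf seg <;> simp [pvStep, hc, hd]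
        simp only [List.foldl_cons, h1, ih, pvSegs, if_neg hc]

-- membership of a '/'-free word among the completed segments, against A's substring tests
theorem pvDir_char (d : List Char) (hd : d ≠ []) (hd2 : '/' ∉ d) :
    ∀ (l seg : List Char),
      d ∈ (pvSegs seg l).1 ↔
        ((∃ e, d = seg ++ e ∧ e ++ ['/'] <+: l) ∨ ('/' :: (d ++ ['/'])) <:+: l) := by
  intro l
  induction l with
  | nil =>
    intro seg
    rw [pvSegs_nil]
    simp only [List.not_mem_nil, false_iff]
    rintro (⟨e, rfl, he⟩ | hinf)
    · exact absurd (List.prefix_nil.mp he) (by simp)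
    · exact absurd (List.infix_nil.mp hinf) (by simp)
  | cons c r ih =>
    intro seg
    by_cases hc : c = '/'
    · subst hc
      rw [pvSegs_slash]
      simp only [List.mem_cons, ih]
      constructor
      · rintro (rfl | ⟨e, rfl, he⟩ | hinf)
        · exact Or.inl ⟨[], by simp⟩
        · refine Or.inr (List.infix_cons_iff.mpr (Or.inl ?_))
          exact List.cons_prefix_cons.mpr ⟨rfl, by simpa using he⟩
        · exact Or.inr (List.infix_cons_iff.mpr (Or.inr hinf))
      · rintro (⟨e, rfl, he⟩ | hinf)
        · cases e with
          | nil => exact Or.inl (by simp)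
          | cons e0 e' =>
            have h2 : e0 = '/' ∧ e' ++ ['/'] <+: r := List.cons_prefix_cons.mp he
            exact absurd h2.1 (by intro h; exact hd2 (by simp [h]))
        · rcases List.infix_cons_iff.mp hinf with hpre | hinf'
          · have h2 := List.cons_prefix_cons.mp hpre
            exact Or.inr (Or.inl ⟨d, by simp, h2.2⟩)
          · exact Or.inr (Or.inr hinf')
    · rw [pvSegs_cons seg c r hc, ih]
      constructor
      · rintro (⟨e, rfl, he⟩ | hinf)
        · exact Or.inl ⟨c :: e, by simp, List.cons_prefix_cons.mpr ⟨rfl, he⟩⟩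
        · exact Or.inr (List.infix_cons_iff.mpr (Or.inr hinf))
      · rintro (⟨e, rfl, he⟩ | hinf)
        · cases e with
          | nil =>
            have h2 : ('/' : Char) = c ∧ ([] : List Char) <+: r :=
              List.cons_prefix_cons.mp (by simpa using he)
            exact absurd h2.1.symm hc
          | cons e0 e' =>
            have h2 : e0 = c ∧ e' ++ ['/'] <+: r := List.cons_prefix_cons.mp he
            exact Or.inl ⟨e', by simp [h2.1], h2.2⟩
        · rcases List.infix_cons_iff.mp hinf with hpre | hinf'
          · exact absurd (List.cons_prefix_cons.mp hpre).1.symm hc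
          · exact Or.inr hinf'

-- a prefix not containing x never reaches past an x
theorem pvPrefix_stop {α : Type} (x : α) (p : List α) (hp : x ∉ p) :
    ∀ (u v : List α), p <+: u ++ x :: v ↔ p <+: u := by
  induction p with
  | nil => intro u v; simp
  | cons c p' ih =>
    intro u v
    cases u with
    | nil =>
      simp only [List.nil_append, List.prefix_nil]
      constructor
      · intro h
        have h2 := List.cons_prefix_cons.mp h
        exact absurd h2.1 (by intro hh; exact hp (by simp [hh]))
      · intro h; simp at h
    | cons a u' =>
      simp only [List.cons_append, List.cons_prefix_cons]
      constructor
      · rintro ⟨rfl, h2⟩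
        exact ⟨rfl, (ih (by intro hh; exact hp (by simp [hh])) u' v).mp h2⟩
      · rintro ⟨rfl, h2⟩
        exact ⟨rfl, (ih (by intro hh; exact hp (by simp [hh])) u' v).mpr h2⟩

theorem pvSuffix_slash (s xs r : List Char) (hs2 : '/' ∉ s) :
    s <:+ xs ++ '/' :: r ↔ s <:+ r := by
  rw [← List.reverse_prefix, ← List.reverse_prefix]
  have h : (xs ++ '/' :: r).reverse = r.reverse ++ '/' :: xs.reverse := by simp
  rw [h]
  exact pvPrefix_stop '/' s.reverse (by simpa using hs2) r.reverse xs.reverse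

-- a '/'-free suffix of the whole string is a suffix of the trailing segment
theorem pvSuffix_char (s : List Char) (hs2 : '/' ∉ s) :
    ∀ (l seg : List Char), (s <:+ seg ++ l ↔ s <:+ (pvSegs seg l).2) := by
  intro l
  induction l with
  | nil => intro seg; rw [pvSegs_nil]; simp
  | cons c r ih =>
    intro seg
    by_cases hc : c = '/'
    · subst hc
      rw [pvSegs_slash, pvSuffix_slash s seg r hs2]
      simpa using ih []
    · rw [pvSegs_cons seg c r hc, ← ih (seg ++ [c]), List.append_assoc]
      simp

theorem pvRevExt (u : List Char) (hu : '.' ∉ u) :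
    ∀ (rev : List Char),
      (u ++ ['.'] <+: rev) ↔ ('.' ∈ rev ∧ rev.takeWhile (· ≠ '.') = u) := by
  intro rev
  induction rev generalizing u with
  | nil => simp
  | cons c rest ih =>
    cases u with
    | nil =>
      by_cases hc : c = '.'
      · subst hc; simp
      · simp [List.cons_prefix_cons, hc, Ne.symm hc]
    | cons a u' =>
      have ha : a ≠ '.' := by intro h; exact hu (by simp [h])
      have hu' : '.' ∉ u' := by intro h; exact hu (by simp [h])
      by_cases hac : a = c
      · subst hac
        simp only [List.cons_append, List.cons_prefix_cons, true_and,
          List.takeWhile_cons]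
        rw [ih u' hu']
        simp [ha, Ne.symm ha]
      · simp only [List.cons_append, List.cons_prefix_cons]
        constructor
        · rintro ⟨rfl, -⟩; exact absurd rfl hac
        · rintro ⟨hmem, htw⟩
          by_cases hc : c = '.'
          · subst hc; simp at htw
          · simp [hc] at htw
            exact absurd htw.1.symm hac

-- a suffix '.'++t with dot-free t is exactly the segment's pvExtOf value
theorem pvExt_suffix (t w : List Char) (ht : '.' ∉ t) :
    (('.' :: t) <:+ w ↔ pvExtOf w = some ('.' :: t)) := by
  rw [← List.reverse_prefix]
  have h1 : ('.' :: t).reverse = t.reverse ++ ['.'] := by simp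
  rw [h1, pvRevExt t.reverse (by simpa using ht) w.reverse]
  unfold pvExtOf
  constructor
  · rintro ⟨hmem, htw⟩
    rw [if_pos (by simpa using hmem)]
    rw [htw]
    simp
  · intro h
    by_cases hm : '.' ∈ w
    · rw [if_pos hm] at h
      have h2 := (Option.some.injEq _ _ ▸ h)
      have h3 : (w.reverse.takeWhile (· ≠ '.')).reverse = t := by
        have := List.cons.injEq .. ▸ h2
        simpa using this
      constructor
      · simpa using hm
      · rw [← h3]; simp
    · rw [if_neg hm] at h; exact absurd h (by simp)

-- literal dictionaries as if-chains
theorem pvDirGetD (s : List Char) :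
    pvDirPrio.getD s 5 =
      if s = "photos".toList then 0 else if s = "video_files".toList then 1
      else if s = "stickers".toList then 2 else if s = "voice_messages".toList then 3
      else if s = "round_video_messages".toList then 4 else 5 := by
  have h : pvDirPrio = PySem.Dict.mk [("photos".toList, 0), ("video_files".toList, 1), ("stickers".toList, 2),
    ("voice_messages".toList, 3), ("round_video_messages".toList, 4), ("files".toList, 5)] := by decide
  rw [h]
  simp only [PySem.Dict.getD, PySem.Dict.get?_mk_cons]
  split_ifs <;> simp_all [PySem.Dict.get?, List.find?]

theorem pvExtMk : pvExtPrio = PySem.Dict.mk [(".jpg".toList, 0), (".jpeg".toList, 0), (".png".toList, 0),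
    (".webp".toList, 0), (".gif".toList, 0), (".mp4".toList, 1), (".mov".toList, 1),
    (".webm".toList, 1), (".mkv".toList, 1), (".ogg".toList, 3)] := by decide

theorem pvExtGetD (s : List Char) :
    pvExtPrio.getD s 5 =
      if s = ".jpg".toList then 0 else if s = ".jpeg".toList then 0
      else if s = ".png".toList then 0 else if s = ".webp".toList then 0
      else if s = ".gif".toList then 0 else if s = ".mp4".toList then 1
      else if s = ".mov".toList then 1 else if s = ".webm".toList then 1
      else if s = ".mkv".toList then 1 else if s = ".ogg".toList then 3 else 5 := by
  rw [pvExtMk]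
  simp only [PySem.Dict.getD, PySem.Dict.get?_mk_cons, beq_iff_eq]
  by_cases h1 : s = ".jpg".toList
  · simp [h1]
  by_cases h2 : s = ".jpeg".toList
  · simp [h2, Ne.symm h1]
  by_cases h3 : s = ".png".toList
  · simp [h3, Ne.symm h1, Ne.symm h2]
  by_cases h4 : s = ".webp".toList
  · simp [h4, Ne.symm h1, Ne.symm h2, Ne.symm h3]
  by_cases h5 : s = ".gif".toList
  · simp [h5, Ne.symm h1, Ne.symm h2, Ne.symm h3, Ne.symm h4]
  by_cases h6 : s = ".mp4".toList
  · simp [h6, Ne.symm h1, Ne.symm h2, Ne.symm h3, Ne.symm h4, Ne.symm h5]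
  by_cases h7 : s = ".mov".toList
  · simp [h7, Ne.symm h1, Ne.symm h2, Ne.symm h3, Ne.symm h4, Ne.symm h5, Ne.symm h6]
  by_cases h8 : s = ".webm".toList
  · simp [h8, Ne.symm h1, Ne.symm h2, Ne.symm h3, Ne.symm h4, Ne.symm h5, Ne.symm h6, Ne.symm h7]
  by_cases h9 : s = ".mkv".toList
  · simp [h9, Ne.symm h1, Ne.symm h2, Ne.symm h3, Ne.symm h4, Ne.symm h5, Ne.symm h6, Ne.symm h7, Ne.symm h8]
  by_cases h10 : s = ".ogg".toList
  · simp [h10, Ne.symm h1, Ne.symm h2, Ne.symm h3, Ne.symm h4, Ne.symm h5, Ne.symm h6, Ne.symm h7, Ne.symm h8, Ne.symm h9]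
  · rw [if_neg (Ne.symm h1), if_neg (Ne.symm h2), if_neg (Ne.symm h3), if_neg (Ne.symm h4),
      if_neg (Ne.symm h5), if_neg (Ne.symm h6), if_neg (Ne.symm h7), if_neg (Ne.symm h8),
      if_neg (Ne.symm h9), if_neg (Ne.symm h10)]
    rw [if_neg h1, if_neg h2, if_neg h3, if_neg h4, if_neg h5, if_neg h6, if_neg h7,
      if_neg h8, if_neg h9, if_neg h10]
    simp [PySem.Dict.get?]

-- generic facts about the running minimum
theorem pvFold_le_iff (f : List Char → Int) :
    ∀ (ds : List (List Char)) (b k : Int),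
      (ds.foldl (fun acc s => min acc (f s)) b ≤ k ↔ b ≤ k ∨ ∃ s ∈ ds, f s ≤ k) := by
  intro ds
  induction ds with
  | nil => intro b k; simp
  | cons s ds ih =>
    intro b k
    rw [List.foldl_cons, ih]
    constructor
    · rintro (h | ⟨s', hs', h⟩)
      · rcases le_or_gt b k with h2 | h2
        · exact Or.inl h2
        · exact Or.inr ⟨s, by simp, by omega⟩
      · exact Or.inr ⟨s', by simp [hs'], h⟩
    · rintro (h | ⟨s', hs', h⟩)
      · exact Or.inl (by omega)
      · rcases List.mem_cons.mp hs' with rfl | hs''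
        · exact Or.inl (by omega)
        · exact Or.inr ⟨s', hs'', h⟩

theorem pvFold_nonneg (f : List Char → Int) (hf : ∀ s, 0 ≤ f s) :
    ∀ (ds : List (List Char)) (b : Int), 0 ≤ b →
      0 ≤ ds.foldl (fun acc s => min acc (f s)) b := by
  intro ds
  induction ds with
  | nil => intro b hb; simpa using hb
  | cons s ds ih =>
    intro b hb
    rw [List.foldl_cons]
    exact ih _ (le_min hb (hf s))

theorem pvFold_le_init (f : List Char → Int) :
    ∀ (ds : List (List Char)) (b : Int), ds.foldl (fun acc s => min acc (f s)) b ≤ b := by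
  intro ds
  induction ds with
  | nil => intro b; simp
  | cons s ds ih =>
    intro b
    rw [List.foldl_cons]
    exact le_trans (ih _) (by omega)

-- A's (substring ∨ prefix) directory test, as segment membership
theorem pvSeg_mem (l d p q : List Char) (hd : d ≠ []) (hd2 : '/' ∉ d)
    (hp : p = '/' :: (d ++ ['/'])) (hq : q = d ++ ['/']) :
    ((PySem.Chars.isIn p l = true) ∨ (PySem.Chars.startswith l q = true)) ↔
      d ∈ (pvSegs [] l).1 := by
  subst hp hq
  rw [PySem.Chars.isIn_iff_infix, PySem.Chars.startswith_iff, pvDir_char d hd hd2 l []]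
  constructor
  · rintro (h | h)
    · exact Or.inr h
    · exact Or.inl ⟨d, by simp, h⟩
  · rintro (⟨e, hde, he⟩ | h)
    · simp only [List.nil_append] at hde
      subst hde
      exact Or.inr he
    · exact Or.inl h

-- A's endswith test, as the trailing segment's extension
theorem pvEndsTest (l t s : List Char) (ht : '.' ∉ t) (hsl : '/' ∉ s) (hs : s = '.' :: t) :
    (PySem.Chars.endswith l s = true) ↔ pvExtOf ((pvSegs [] l).2) = some s := by
  subst hs
  rw [PySem.Chars.endswith_iff]
  have h1 := pvSuffix_char ('.' :: t) hsl l []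
  simp only [List.nil_append] at h1
  rw [h1, pvExt_suffix t _ ht]

-- cumulative characterization of the folded minimum over ds
theorem pvN_le0 (ds : List (List Char)) :
    ds.foldl (fun acc s => min acc (pvDirPrio.getD s 5)) 5 ≤ 0 ↔ "photos".toList ∈ ds := by
  rw [pvFold_le_iff]
  constructor
  · rintro (h | ⟨s, hs, hle⟩)
    · omega
    · rw [pvDirGetD] at hle
      split_ifs at hle with a1 a2 a3 a4 a5
      · exact a1 ▸ hs
      all_goals omega
  · intro h
    exact Or.inr ⟨_, h, by simp [pvDirGetD]⟩

theorem pvN_le1 (ds : List (List Char)) :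
    ds.foldl (fun acc s => min acc (pvDirPrio.getD s 5)) 5 ≤ 1 ↔
      "photos".toList ∈ ds ∨ "video_files".toList ∈ ds := by
  rw [pvFold_le_iff]
  constructor
  · rintro (h | ⟨s, hs, hle⟩)
    · omega
    · rw [pvDirGetD] at hle
      split_ifs at hle with a1 a2 a3 a4 a5
      · exact Or.inl (a1 ▸ hs)
      · exact Or.inr (a2 ▸ hs)
      all_goals omega
  · rintro (h | h)
    · exact Or.inr ⟨_, h, by simp [pvDirGetD]⟩
    · exact Or.inr ⟨_, h, by simp [pvDirGetD]⟩

theorem pvN_le2 (ds : List (List Char)) :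
    ds.foldl (fun acc s => min acc (pvDirPrio.getD s 5)) 5 ≤ 2 ↔
      "photos".toList ∈ ds ∨ "video_files".toList ∈ ds ∨ "stickers".toList ∈ ds := by
  rw [pvFold_le_iff]
  constructor
  · rintro (h | ⟨s, hs, hle⟩)
    · omega
    · rw [pvDirGetD] at hle
      split_ifs at hle with a1 a2 a3 a4 a5
      · exact Or.inl (a1 ▸ hs)
      · exact Or.inr (Or.inl (a2 ▸ hs))
      · exact Or.inr (Or.inr (a3 ▸ hs))
      all_goals omega
  · rintro (h | h | h) <;> exact Or.inr ⟨_, h, by simp [pvDirGetD]⟩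

theorem pvN_le3 (ds : List (List Char)) :
    ds.foldl (fun acc s => min acc (pvDirPrio.getD s 5)) 5 ≤ 3 ↔
      "photos".toList ∈ ds ∨ "video_files".toList ∈ ds ∨ "stickers".toList ∈ ds ∨
        "voice_messages".toList ∈ ds := by
  rw [pvFold_le_iff]
  constructor
  · rintro (h | ⟨s, hs, hle⟩)
    · omega
    · rw [pvDirGetD] at hle
      split_ifs at hle with a1 a2 a3 a4 a5
      · exact Or.inl (a1 ▸ hs)
      · exact Or.inr (Or.inl (a2 ▸ hs))
      · exact Or.inr (Or.inr (Or.inl (a3 ▸ hs)))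
      · exact Or.inr (Or.inr (Or.inr (a4 ▸ hs)))
      all_goals omega
  · rintro (h | h | h | h) <;> exact Or.inr ⟨_, h, by simp [pvDirGetD]⟩

theorem pvN_le4 (ds : List (List Char)) :
    ds.foldl (fun acc s => min acc (pvDirPrio.getD s 5)) 5 ≤ 4 ↔
      "photos".toList ∈ ds ∨ "video_files".toList ∈ ds ∨ "stickers".toList ∈ ds ∨
        "voice_messages".toList ∈ ds ∨ "round_video_messages".toList ∈ ds := by
  rw [pvFold_le_iff]
  constructor
  · rintro (h | ⟨s, hs, hle⟩)
    · omega
    · rw [pvDirGetD] at hle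
      split_ifs at hle with a1 a2 a3 a4 a5
      · exact Or.inl (a1 ▸ hs)
      · exact Or.inr (Or.inl (a2 ▸ hs))
      · exact Or.inr (Or.inr (Or.inl (a3 ▸ hs)))
      · exact Or.inr (Or.inr (Or.inr (Or.inl (a4 ▸ hs))))
      · exact Or.inr (Or.inr (Or.inr (Or.inr (a5 ▸ hs))))
      all_goals omega
  · rintro (h | h | h | h | h) <;> exact Or.inr ⟨_, h, by simp [pvDirGetD]⟩

-- the extension dictionary's value groups
theorem pvVC (x : List Char) :
    pvExtPrio.getD x 5 = 0 ∨ pvExtPrio.getD x 5 = 1 ∨ pvExtPrio.getD x 5 = 3 ∨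
      pvExtPrio.getD x 5 = 5 := by
  rw [pvExtGetD]; split_ifs <;> omega

theorem pvV0 (x : List Char) :
    pvExtPrio.getD x 5 = 0 ↔
      (x = ".jpg".toList ∨ x = ".jpeg".toList ∨ x = ".png".toList ∨ x = ".webp".toList ∨
        x = ".gif".toList) := by
  rw [pvExtGetD]; split_ifs <;> simp_all

theorem pvV1 (x : List Char) :
    pvExtPrio.getD x 5 = 1 ↔
      (x = ".mp4".toList ∨ x = ".mov".toList ∨ x = ".webm".toList ∨ x = ".mkv".toList) := by
  rw [pvExtGetD]; split_ifs <;> simp_all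

theorem pvV3 (x : List Char) : pvExtPrio.getD x 5 = 3 ↔ x = ".ogg".toList := by
  rw [pvExtGetD]; split_ifs <;> simp_all

-- the whole equivalence, over the lowered character list
theorem pvMain (l : List Char) :
    (if (PySem.Chars.isIn "/photos/".toList l || PySem.Chars.startswith l "photos/".toList ||
          (PySem.Chars.endswith l ".jpg".toList || (PySem.Chars.endswith l ".jpeg".toList ||
            (PySem.Chars.endswith l ".png".toList || (PySem.Chars.endswith l ".webp".toList ||
              PySem.Chars.endswith l ".gif".toList))))) = true then "photo"
     else if (PySem.Chars.isIn "/video_files/".toList l || PySem.Chars.startswith l "video_files/".toList ||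
          (PySem.Chars.endswith l ".mp4".toList || (PySem.Chars.endswith l ".mov".toList ||
            (PySem.Chars.endswith l ".webm".toList || PySem.Chars.endswith l ".mkv".toList)))) = true then "video"
     else if (PySem.Chars.isIn "/stickers/".toList l || PySem.Chars.startswith l "stickers/".toList) = true then "sticker"
     else if (PySem.Chars.isIn "/voice_messages/".toList l || PySem.Chars.startswith l "voice_messages/".toList ||
          PySem.Chars.endswith l ".ogg".toList) = true then "voice"
     else if (PySem.Chars.isIn "/round_video_messages/".toList l || PySem.Chars.startswith l "round_video_messages/".toList) = true then "round_video"
     else if (PySem.Chars.isIn "/files/".toList l || PySem.Chars.startswith l "files/".toList) = true then "file"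
     else "file") =
    PySem.List.pyGetD pvLabels
      (match (List.foldl pvStep (5, [], none) l).2.2 with
       | some e => min (List.foldl pvStep (5, [], none) l).1 (pvExtPrio.getD e 5)
       | none => (List.foldl pvStep (5, [], none) l).1) "file" := by
  rw [show ((5 : Int), ([] : List Char), (none : Option (List Char))) =
        ((5 : Int), ([] : List Char), pvExtOf []) by rw [pvExtOf_nil]]
  rw [pvFold_char l 5 []]
  dsimp only
  set ds := (pvSegs [] l).1 with hds
  set w := (pvSegs [] l).2 with hw
  set n := List.foldl (fun acc s => min acc (pvDirPrio.getD s 5)) 5 ds with hn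
  have hM1 := pvSeg_mem l "photos".toList "/photos/".toList "photos/".toList (by decide) (by decide) (by decide) (by decide)
  have hM2 := pvSeg_mem l "video_files".toList "/video_files/".toList "video_files/".toList (by decide) (by decide) (by decide) (by decide)
  have hM3 := pvSeg_mem l "stickers".toList "/stickers/".toList "stickers/".toList (by decide) (by decide) (by decide) (by decide)
  have hM4 := pvSeg_mem l "voice_messages".toList "/voice_messages/".toList "voice_messages/".toList (by decide) (by decide) (by decide) (by decide)
  have hM5 := pvSeg_mem l "round_video_messages".toList "/round_video_messages/".toList "round_video_messages/".toList (by decide) (by decide) (by decide) (by decide)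
  have hM6 := pvSeg_mem l "files".toList "/files/".toList "files/".toList (by decide) (by decide) (by decide) (by decide)
  have hE1 := pvEndsTest l "jpg".toList ".jpg".toList (by decide) (by decide) (by decide)
  have hE2 := pvEndsTest l "jpeg".toList ".jpeg".toList (by decide) (by decide) (by decide)
  have hE3 := pvEndsTest l "png".toList ".png".toList (by decide) (by decide) (by decide)
  have hE4 := pvEndsTest l "webp".toList ".webp".toList (by decide) (by decide) (by decide)
  have hE5 := pvEndsTest l "gif".toList ".gif".toList (by decide) (by decide) (by decide)
  have hE6 := pvEndsTest l "mp4".toList ".mp4".toList (by decide) (by decide) (by decide)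
  have hE7 := pvEndsTest l "mov".toList ".mov".toList (by decide) (by decide) (by decide)
  have hE8 := pvEndsTest l "webm".toList ".webm".toList (by decide) (by decide) (by decide)
  have hE9 := pvEndsTest l "mkv".toList ".mkv".toList (by decide) (by decide) (by decide)
  have hE10 := pvEndsTest l "ogg".toList ".ogg".toList (by decide) (by decide) (by decide)
  rw [← hds] at hM1 hM2 hM3 hM4 hM5 hM6
  rw [← hw] at hE1 hE2 hE3 hE4 hE5 hE6 hE7 hE8 hE9 hE10
  have hb0 : 0 ≤ n := pvFold_nonneg _ (fun s => by rw [pvDirGetD]; split_ifs <;> omega) ds 5 (by omega)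
  have hb5 : n ≤ 5 := pvFold_le_init _ ds 5
  have h0 := pvN_le0 ds
  have h1 := pvN_le1 ds
  have h2 := pvN_le2 ds
  have h3 := pvN_le3 ds
  have h4 := pvN_le4 ds
  rw [← hn] at h0 h1 h2 h3 h4
  rcases hEe : pvExtOf w with _ | x
  · -- no extension on the trailing segment
    have hE1' : PySem.Chars.endswith l ".jpg".toList = true ↔ False := by rw [hE1, hEe]; simp
    have hE2' : PySem.Chars.endswith l ".jpeg".toList = true ↔ False := by rw [hE2, hEe]; simp
    have hE3' : PySem.Chars.endswith l ".png".toList = true ↔ False := by rw [hE3, hEe]; simp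
    have hE4' : PySem.Chars.endswith l ".webp".toList = true ↔ False := by rw [hE4, hEe]; simp
    have hE5' : PySem.Chars.endswith l ".gif".toList = true ↔ False := by rw [hE5, hEe]; simp
    have hE6' : PySem.Chars.endswith l ".mp4".toList = true ↔ False := by rw [hE6, hEe]; simp
    have hE7' : PySem.Chars.endswith l ".mov".toList = true ↔ False := by rw [hE7, hEe]; simp
    have hE8' : PySem.Chars.endswith l ".webm".toList = true ↔ False := by rw [hE8, hEe]; simp
    have hE9' : PySem.Chars.endswith l ".mkv".toList = true ↔ False := by rw [hE9, hEe]; simp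
    have hE10' : PySem.Chars.endswith l ".ogg".toList = true ↔ False := by rw [hE10, hEe]; simp
    simp only [Bool.or_eq_true]
    simp only [hE1', hE2', hE3', hE4', hE5', hE6', hE7', hE8', hE9', hE10', or_false, false_or]
    simp only [hM1, hM2, hM3, hM4, hM5, hM6]
    split_ifs with hc1 hc2 hc3 hc4 hc5 hc6
    · have hidx : n = 0 := by have := h0.mpr hc1; omega
      show "photo" = PySem.List.pyGetD pvLabels n "file"
      rw [hidx]; decide
    · have ha : ¬ n ≤ 0 := fun hh => hc1 (h0.mp hh)
      have hb := h1.mpr (Or.inr hc2)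
      have hidx : n = 1 := by omega
      show "video" = PySem.List.pyGetD pvLabels n "file"
      rw [hidx]; decide
    · have ha : ¬ n ≤ 1 := fun hh => (h1.mp hh).elim hc1 hc2
      have hb := h2.mpr (Or.inr (Or.inr hc3))
      have hidx : n = 2 := by omega
      show "sticker" = PySem.List.pyGetD pvLabels n "file"
      rw [hidx]; decide
    · have ha : ¬ n ≤ 2 := by
        intro hh; rcases h2.mp hh with h | h | h
        exacts [hc1 h, hc2 h, hc3 h]
      have hb := h3.mpr (Or.inr (Or.inr (Or.inr hc4)))
      have hidx : n = 3 := by omega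
      show "voice" = PySem.List.pyGetD pvLabels n "file"
      rw [hidx]; decide
    · have ha : ¬ n ≤ 3 := by
        intro hh; rcases h3.mp hh with h | h | h | h
        exacts [hc1 h, hc2 h, hc3 h, hc4 h]
      have hb := h4.mpr (Or.inr (Or.inr (Or.inr (Or.inr hc5))))
      have hidx : n = 4 := by omega
      show "round_video" = PySem.List.pyGetD pvLabels n "file"
      rw [hidx]; decide
    · have ha : ¬ n ≤ 4 := by
        intro hh; rcases h4.mp hh with h | h | h | h | h
        exacts [hc1 h, hc2 h, hc3 h, hc4 h, hc5 h]
      have hidx : n = 5 := by omega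
      show "file" = PySem.List.pyGetD pvLabels n "file"
      rw [hidx]; decide
    · have ha : ¬ n ≤ 4 := by
        intro hh; rcases h4.mp hh with h | h | h | h | h
        exacts [hc1 h, hc2 h, hc3 h, hc4 h, hc5 h]
      have hidx : n = 5 := by omega
      show "file" = PySem.List.pyGetD pvLabels n "file"
      rw [hidx]; decide
  · -- trailing segment has extension x
    have hvc := pvVC x
    have hv0 := pvV0 x
    have hv1 := pvV1 x
    have hv3 := pvV3 x
    have hE1' : PySem.Chars.endswith l ".jpg".toList = true ↔ x = ".jpg".toList := by rw [hE1, hEe]; simp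
    have hE2' : PySem.Chars.endswith l ".jpeg".toList = true ↔ x = ".jpeg".toList := by rw [hE2, hEe]; simp
    have hE3' : PySem.Chars.endswith l ".png".toList = true ↔ x = ".png".toList := by rw [hE3, hEe]; simp
    have hE4' : PySem.Chars.endswith l ".webp".toList = true ↔ x = ".webp".toList := by rw [hE4, hEe]; simp
    have hE5' : PySem.Chars.endswith l ".gif".toList = true ↔ x = ".gif".toList := by rw [hE5, hEe]; simp
    have hE6' : PySem.Chars.endswith l ".mp4".toList = true ↔ x = ".mp4".toList := by rw [hE6, hEe]; simp
    have hE7' : PySem.Chars.endswith l ".mov".toList = true ↔ x = ".mov".toList := by rw [hE7, hEe]; simp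
    have hE8' : PySem.Chars.endswith l ".webm".toList = true ↔ x = ".webm".toList := by rw [hE8, hEe]; simp
    have hE9' : PySem.Chars.endswith l ".mkv".toList = true ↔ x = ".mkv".toList := by rw [hE9, hEe]; simp
    have hE10' : PySem.Chars.endswith l ".ogg".toList = true ↔ x = ".ogg".toList := by rw [hE10, hEe]; simp
    simp only [Bool.or_eq_true]
    simp only [hE1', hE2', hE3', hE4', hE5', hE6', hE7', hE8', hE9', hE10']
    simp only [← or_assoc]
    simp only [hM1, hM2, hM3, hM4, hM5, hM6]
    simp only [or_assoc]
    split_ifs with hc1 hc2 hc3 hc4 hc5 hc6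
    · have ha : n ≤ 0 ∨ pvExtPrio.getD x 5 = 0 := by
        rcases hc1 with h | h
        · exact Or.inl (h0.mpr h)
        · exact Or.inr (hv0.mpr h)
      have hidx : min n (pvExtPrio.getD x 5) = 0 := by omega
      show "photo" = PySem.List.pyGetD pvLabels (min n (pvExtPrio.getD x 5)) "file"
      rw [hidx]; decide
    · have ha : ¬ n ≤ 0 := fun hh => hc1 (Or.inl (h0.mp hh))
      have hb : ¬ pvExtPrio.getD x 5 = 0 := fun hh => hc1 (Or.inr (hv0.mp hh))
      have hcx : n ≤ 1 ∨ pvExtPrio.getD x 5 = 1 := by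
        rcases hc2 with h | h
        · exact Or.inl (h1.mpr (Or.inr h))
        · exact Or.inr (hv1.mpr h)
      have hidx : min n (pvExtPrio.getD x 5) = 1 := by omega
      show "video" = PySem.List.pyGetD pvLabels (min n (pvExtPrio.getD x 5)) "file"
      rw [hidx]; decide
    · have ha : ¬ n ≤ 1 := by
        intro hh; rcases h1.mp hh with h | h
        exacts [hc1 (Or.inl h), hc2 (Or.inl h)]
      have hb : ¬ pvExtPrio.getD x 5 = 0 := fun hh => hc1 (Or.inr (hv0.mp hh))
      have hb' : ¬ pvExtPrio.getD x 5 = 1 := fun hh => hc2 (Or.inr (hv1.mp hh))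
      have hcx : n ≤ 2 := h2.mpr (Or.inr (Or.inr hc3))
      have hidx : min n (pvExtPrio.getD x 5) = 2 := by omega
      show "sticker" = PySem.List.pyGetD pvLabels (min n (pvExtPrio.getD x 5)) "file"
      rw [hidx]; decide
    · have ha : ¬ n ≤ 2 := by
        intro hh; rcases h2.mp hh with h | h | h
        exacts [hc1 (Or.inl h), hc2 (Or.inl h), hc3 h]
      have hb : ¬ pvExtPrio.getD x 5 = 0 := fun hh => hc1 (Or.inr (hv0.mp hh))
      have hb' : ¬ pvExtPrio.getD x 5 = 1 := fun hh => hc2 (Or.inr (hv1.mp hh))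
      have hcx : n ≤ 3 ∨ pvExtPrio.getD x 5 = 3 := by
        rcases hc4 with h | h
        · exact Or.inl (h3.mpr (Or.inr (Or.inr (Or.inr h))))
        · exact Or.inr (hv3.mpr h)
      have hidx : min n (pvExtPrio.getD x 5) = 3 := by omega
      show "voice" = PySem.List.pyGetD pvLabels (min n (pvExtPrio.getD x 5)) "file"
      rw [hidx]; decide
    · have ha : ¬ n ≤ 3 := by
        intro hh; rcases h3.mp hh with h | h | h | h
        exacts [hc1 (Or.inl h), hc2 (Or.inl h), hc3 h, hc4 (Or.inl h)]
      have hb : ¬ pvExtPrio.getD x 5 = 0 := fun hh => hc1 (Or.inr (hv0.mp hh))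
      have hb' : ¬ pvExtPrio.getD x 5 = 1 := fun hh => hc2 (Or.inr (hv1.mp hh))
      have hb'' : ¬ pvExtPrio.getD x 5 = 3 := fun hh => hc4 (Or.inr (hv3.mp hh))
      have hcx : n ≤ 4 := h4.mpr (Or.inr (Or.inr (Or.inr (Or.inr hc5))))
      have hidx : min n (pvExtPrio.getD x 5) = 4 := by omega
      show "round_video" = PySem.List.pyGetD pvLabels (min n (pvExtPrio.getD x 5)) "file"
      rw [hidx]; decide
    · have ha : ¬ n ≤ 4 := by
        intro hh; rcases h4.mp hh with h | h | h | h | h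
        exacts [hc1 (Or.inl h), hc2 (Or.inl h), hc3 h, hc4 (Or.inl h), hc5 h]
      have hb : ¬ pvExtPrio.getD x 5 = 0 := fun hh => hc1 (Or.inr (hv0.mp hh))
      have hb' : ¬ pvExtPrio.getD x 5 = 1 := fun hh => hc2 (Or.inr (hv1.mp hh))
      have hb'' : ¬ pvExtPrio.getD x 5 = 3 := fun hh => hc4 (Or.inr (hv3.mp hh))
      have hidx : min n (pvExtPrio.getD x 5) = 5 := by omega
      show "file" = PySem.List.pyGetD pvLabels (min n (pvExtPrio.getD x 5)) "file"
      rw [hidx]; decide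
    · have ha : ¬ n ≤ 4 := by
        intro hh; rcases h4.mp hh with h | h | h | h | h
        exacts [hc1 (Or.inl h), hc2 (Or.inl h), hc3 h, hc4 (Or.inl h), hc5 h]
      have hb : ¬ pvExtPrio.getD x 5 = 0 := fun hh => hc1 (Or.inr (hv0.mp hh))
      have hb' : ¬ pvExtPrio.getD x 5 = 1 := fun hh => hc2 (Or.inr (hv1.mp hh))
      have hb'' : ¬ pvExtPrio.getD x 5 = 3 := fun hh => hc4 (Or.inr (hv3.mp hh))
      have hidx : min n (pvExtPrio.getD x 5) = 5 := by omega
      show "file" = PySem.List.pyGetD pvLabels (min n (pvExtPrio.getD x 5)) "file"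
      rw [hidx]; decide

-- ===== VERDICT (by name: the statement is the Claim_ definition above) =====
theorem classify_href_spec : Claim_equal_classify_href := by
  intro href _
  unfold Spec_classify_href classify_href classify_href_alt
  simp only [PySem.Str.isIn_eq, PySem.Str.startswith_eq, PySem.Str.endswith_eq,
    List.any_cons, List.any_nil, Bool.or_false]
  exact pvMain _
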